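-- pv_equiv track=rewrite | github.com/chenyangh/verl | verl/utils/reward_score/pangu_math/parser.py | extract_box_str
-- ===== SOURCE A (Python) =====
-- def extract_box_str(resp: str) -> str:
--     resp = resp.replace("\u043a\u0438", "")
--     pred_str = ""
--     if "boxed" in resp:
--         ans = resp.split("boxed")[-1]
--         if len(ans) == 0:
--             return ""
--         elif ans[0] == "{":
--             stack = 1
--             a = ""
--             for c in ans[1:]:
--                 if c == "{":
--                     stack += 1
--                     a += c
--                 elif c == "}":
--                     stack -= 1
--                     if stack == 0:
--                         break
--                     a += c
--                 else:
--                     a += c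
--         else:
--             a = ans.split("$")[0].strip()
--         pred_str = a
--
--     return pred_str
-- ===== SOURCE B (Python) =====
-- def extract_box_str(resp: str) -> str:
--     resp = resp.replace("\u043a\u0438", "")
--     if "boxed" not in resp:
--         return ""
--     ans = resp.split("boxed")[-1]
--     if len(ans) == 0:
--         return ""
--     if ans[0] != "{":
--         return ans.split("$")[0].strip()
--     body = ans[1:]
--     # the matching close is the first closing brace whose preceding prefix is brace-balanced;
--     # jump from one '}' to the next instead of walking every character
--     pos = 0
--     while True:
--         j = body.find("}", pos)
--         if j == -1:
--             return body
--         if body[:j].count("{") == body[:j].count("}"):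
--             return body[:j]
--         pos = j + 1
-- ===== Notes on version B (the rewrite author's own statement) =====
-- stated objective: alternative
-- what changed: In the brace branch B replaces A's character-by-character depth-counting accumulation by a substring-search algorithm: it jumps with str.find from one closing brace to the next and stops at the first closing brace whose preceding prefix contains equally many opening and closing braces (checked with str.count), returning that prefix as one slice; the outer structure becomes guard-clause early returns.
import Mathlib
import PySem

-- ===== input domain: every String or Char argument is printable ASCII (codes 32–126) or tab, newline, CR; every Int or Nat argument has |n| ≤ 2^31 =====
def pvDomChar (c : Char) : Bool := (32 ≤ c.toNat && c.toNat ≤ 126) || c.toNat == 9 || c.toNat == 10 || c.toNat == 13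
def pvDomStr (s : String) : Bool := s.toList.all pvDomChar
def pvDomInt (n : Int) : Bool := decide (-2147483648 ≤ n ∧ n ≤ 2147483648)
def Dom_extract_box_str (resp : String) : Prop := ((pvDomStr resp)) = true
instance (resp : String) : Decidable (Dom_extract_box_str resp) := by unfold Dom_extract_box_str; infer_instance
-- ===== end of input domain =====

-- B replaces A's character-by-character depth-counting accumulation by a substring-search
-- algorithm (find the next '}' and test the brace counts of its prefix); alternative, same task.

-- ===== PORT A =====
-- the Python for-loop with `a += c`, depth counter `stack` and break, as structural recursion
def pvALoop : List Char → Int → List Char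
  | [], _ => []
  | c :: rest, stack =>
    if c = '{' then c :: pvALoop rest (stack + 1)
    else if c = '}' then
      (if stack - 1 = 0 then [] else c :: pvALoop rest (stack - 1))
    else c :: pvALoop rest stack

def extract_box_str (resp : String) : String :=
  let resp := PySem.Str.replace resp "ки" ""
  let pred_str := ""
  if PySem.Str.isIn "boxed" resp then
    let ans := (PySem.List.pyGet? ((PySem.Str.split? resp "boxed").getD []) (-1)).getD ""
    if PySem.Str.len ans = 0 then ""
    else if PySem.List.pyGet? ans.toList 0 = some '{' then
      String.ofList (pvALoop (PySem.List.slice ans.toList (some 1) none) 1)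
    else
      PySem.Str.strip ((PySem.List.pyGet? ((PySem.Str.split? ans "$").getD []) 0).getD "")
  else pred_str

-- ===== PORT B =====
-- Source B's `while True` loop: find the next closing brace from pos, stop when the prefix
-- before it is brace-balanced (Python's str.count over a slice is ported as List.count on
-- `take`, exact for a single-character needle); fuel only makes the while-loop total,
-- body.length + 1 steps always suffice (each iteration moves pos strictly forward).
def pvBLoop : Nat → List Char → Nat → List Char
  | 0, body, _ => body
  | fuel + 1, body, pos =>
    let j := PySem.Chars.findFrom body ['}'] (pos : Int) none
    if j = -1 then body
    else if (body.take j.toNat).count '{' = (body.take j.toNat).count '}' then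
      body.take j.toNat
    else pvBLoop fuel body (j.toNat + 1)

def extract_box_str_alt (resp : String) : String :=
  let resp := PySem.Str.replace resp "ки" ""
  if PySem.Str.isIn "boxed" resp = false then "" else
  let ans := (PySem.List.pyGet? ((PySem.Str.split? resp "boxed").getD []) (-1)).getD ""
  if PySem.Str.len ans = 0 then "" else
  if PySem.List.pyGet? ans.toList 0 ≠ some '{' then
    PySem.Str.strip ((PySem.List.pyGet? ((PySem.Str.split? ans "$").getD []) 0).getD "")
  else
    let body := PySem.List.slice ans.toList (some 1) none
    String.ofList (pvBLoop (body.length + 1) body 0)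

-- ===== PRECONDITION & SPEC =====
def Spec_extract_box_str (resp : String) (out : String) : Prop := out = extract_box_str_alt resp
instance (resp : String) (out : String) : Decidable (Spec_extract_box_str resp out) := by unfold Spec_extract_box_str; infer_instance

-- ===== CLAIM (what is proved, stated in full; the proofs are below) =====
def Claim_equal_extract_box_str : Prop := ∀ (resp : String), Dom_extract_box_str resp → Spec_extract_box_str resp (extract_box_str resp)

-- ===== LEMMAS AND PROOFS =====
-- index at which A's loop stops (the char count it keeps), as a pure index function
def pvIdxE : List Char → Int → Nat
  | [], _ => 0
  | c :: rest, d =>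
    if c = '{' then pvIdxE rest (d + 1) + 1
    else if c = '}' then (if d - 1 = 0 then 0 else pvIdxE rest (d - 1) + 1)
    else pvIdxE rest d + 1

-- the stop condition both loops look for: a '}' whose prefix balance is 1 - d
def pvStop (cs : List Char) (d : Int) (m : Nat) : Prop :=
  cs[m]? = some '}' ∧ ((cs.take m).count '{' : Int) - ((cs.take m).count '}' : Int) = 1 - d

theorem pvALoop_eq_take (cs : List Char) : ∀ d : Int, pvALoop cs d = cs.take (pvIdxE cs d) := by
  induction cs with
  | nil => intro d; simp [pvALoop, pvIdxE]
  | cons c rest ih =>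
    intro d
    by_cases h1 : c = '{'
    · simp [pvALoop, pvIdxE, h1, ih]
    · by_cases h2 : c = '}'
      · by_cases h3 : d - 1 = 0 <;> simp [pvALoop, pvIdxE, h2, h3, ih]
      · simp [pvALoop, pvIdxE, h1, h2, ih]

theorem pvIdxE_le (cs : List Char) : ∀ d : Int, pvIdxE cs d ≤ cs.length := by
  induction cs with
  | nil => intro d; simp [pvIdxE]
  | cons c rest ih =>
    intro d
    by_cases h1 : c = '{'
    · simpa [pvIdxE, h1] using ih (d + 1)
    · by_cases h2 : c = '}'
      · by_cases h3 : d - 1 = 0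
        · simp [pvIdxE, h2, h3]
        · simpa [pvIdxE, h1, h2, h3] using ih (d - 1)
      · simpa [pvIdxE, h1, h2] using ih d

theorem pvStop_zero (c : Char) (rest : List Char) (d : Int) :
    pvStop (c :: rest) d 0 ↔ (c = '}' ∧ d = 1) := by
  unfold pvStop
  simp only [List.getElem?_cons_zero, List.take_zero, List.count_nil, Option.some.injEq]
  constructor
  · rintro ⟨h, hb⟩; exact ⟨h, by omega⟩
  · rintro ⟨h, hd⟩; exact ⟨h, by omega⟩

theorem pvStop_cons (c : Char) (rest : List Char) (d : Int) (m : Nat) :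
    pvStop (c :: rest) d (m + 1) ↔
      pvStop rest (d + (if c = '{' then 1 else if c = '}' then -1 else 0)) m := by
  unfold pvStop
  simp only [List.getElem?_cons_succ, List.take_succ_cons, List.count_cons, beq_iff_eq]
  constructor
  · rintro ⟨h, hb⟩
    refine ⟨h, ?_⟩
    split_ifs at hb ⊢ <;> simp_all <;> omega
  · rintro ⟨h, hb⟩
    refine ⟨h, ?_⟩
    split_ifs at hb ⊢ <;> simp_all <;> omega

theorem pvIdxE_spec (cs : List Char) : ∀ d : Int, 1 ≤ d →
    (∀ m, m < pvIdxE cs d → ¬ pvStop cs d m) ∧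
    (pvIdxE cs d < cs.length → pvStop cs d (pvIdxE cs d)) := by
  induction cs with
  | nil =>
    intro d _
    exact ⟨fun m hm => by simp [pvIdxE] at hm, fun h => by simp [pvIdxE] at h⟩
  | cons c rest ih =>
    intro d hd
    by_cases h1 : c = '{'
    · subst h1
      have ihr := ih (d + 1) (by omega)
      have hidx : pvIdxE ('{' :: rest) d = pvIdxE rest (d + 1) + 1 := by simp [pvIdxE]
      constructor
      · intro m hm
        cases m with
        | zero => rw [pvStop_zero]; rintro ⟨h, -⟩; simp at h
        | succ m' =>
          rw [pvStop_cons]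
          simp only [if_pos rfl]
          exact ihr.1 m' (by rw [hidx] at hm; omega)
      · intro hlen
        rw [hidx] at hlen ⊢
        rw [pvStop_cons]
        simp only [if_pos rfl]
        exact ihr.2 (by simpa using hlen)
    · by_cases h2 : c = '}'
      · subst h2
        by_cases h3 : d - 1 = 0
        · have hidx : pvIdxE ('}' :: rest) d = 0 := by simp [pvIdxE, h3]
          refine ⟨fun m hm => by omega, fun _ => ?_⟩
          rw [hidx, pvStop_zero]
          exact ⟨rfl, by omega⟩
        · have ihr := ih (d - 1) (by omega)
          have hidx : pvIdxE ('}' :: rest) d = pvIdxE rest (d - 1) + 1 := by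
            simp [pvIdxE, h3]
          have hδ : ∀ m, pvStop ('}' :: rest) d (m + 1) ↔ pvStop rest (d - 1) m := by
            intro m
            rw [pvStop_cons,
              show (if ('}' : Char) = '{' then (1 : Int) else if ('}' : Char) = '}' then -1 else 0) = -1 by decide,
              show d + (-1) = d - 1 by ring]
          constructor
          · intro m hm
            cases m with
            | zero => rw [pvStop_zero]; rintro ⟨-, h⟩; omega
            | succ m' =>
              rw [hδ]
              exact ihr.1 m' (by rw [hidx] at hm; omega)
          · intro hlen
            rw [hidx] at hlen ⊢
            rw [hδ]
            exact ihr.2 (by simpa using hlen)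
      · have ihr := ih d hd
        have hidx : pvIdxE (c :: rest) d = pvIdxE rest d + 1 := by simp [pvIdxE, h1, h2]
        have hδ : ∀ m, pvStop (c :: rest) d (m + 1) ↔ pvStop rest d m := by
          intro m
          rw [pvStop_cons]
          simp only [if_neg h1, if_neg h2, add_zero]
        constructor
        · intro m hm
          cases m with
          | zero => rw [pvStop_zero]; rintro ⟨h, -⟩; exact h2 h
          | succ m' =>
            rw [hδ]
            exact ihr.1 m' (by rw [hidx] at hm; omega)
        · intro hlen
          rw [hidx] at hlen ⊢
          rw [hδ]
          exact ihr.2 (by simpa using hlen)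

-- singleton prefix of a drop ↔ the character at that index
theorem pvSingleton_prefix_drop (cs : List Char) (n : Nat) :
    ['}'] <+: cs.drop n ↔ cs[n]? = some '}' := by
  constructor
  · rintro ⟨t, ht⟩
    have h0 : (cs.drop n)[0]? = some '}' := by rw [← ht]; rfl
    simpa using h0
  · intro h
    have h0 : (cs.drop n)[0]? = some '}' := by simpa using h
    match hcs : cs.drop n with
    | [] => rw [hcs] at h0; simp at h0
    | c :: t =>
      rw [hcs] at h0
      simp at h0
      refine ⟨t, ?_⟩
      rw [h0]
      rfl


theorem pvSingleton_infix_of_getElem (cs : List Char) (pos m : Nat) (hm : pos ≤ m)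
    (hc : cs[m]? = some '}') : ['}'] <:+: cs.drop pos := by
  have hmem : '}' ∈ cs.drop pos := by
    have : (cs.drop pos)[m - pos]? = some '}' := by
      rw [List.getElem?_drop]
      rwa [show pos + (m - pos) = m by omega]
    exact List.mem_of_getElem? this
  obtain ⟨s, t, hst⟩ := List.append_of_mem hmem
  exact ⟨s, t, by rw [hst]; simp⟩

theorem pvBLoop_eq_take (cs : List Char) : ∀ (fuel pos : Nat),
    pos ≤ cs.length → cs.length < fuel + pos →
    (∀ m, m < pos → ¬ pvStop cs 1 m) →
    pvBLoop fuel cs pos = cs.take (pvIdxE cs 1) := by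
  intro fuel
  induction fuel with
  | zero => intro pos hpos hfuel _; omega
  | succ fuel ih =>
    intro pos hpos hfuel hinv
    simp only [pvBLoop]
    by_cases hj : PySem.Chars.findFrom cs ['}'] (pos : Int) none = -1
    · -- no '}' at or after pos: no stop index anywhere, both keep everything
      rw [if_pos hj]
      have hno : ¬ ['}'] <:+: cs.drop pos :=
        (PySem.Chars.findFrom_natCast_eq_neg_one_iff cs ['}'] pos hpos).mp hj
      have hnostop : ∀ m, ¬ pvStop cs 1 m := by
        intro m hstop
        by_cases hm : m < pos
        · exact hinv m hm hstop
        · exact hno (pvSingleton_infix_of_getElem cs pos m (by omega) hstop.1)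
      have hidx : pvIdxE cs 1 = cs.length := by
        rcases Nat.lt_or_ge (pvIdxE cs 1) cs.length with h | h
        · exact absurd ((pvIdxE_spec cs 1 le_rfl).2 h) (hnostop _)
        · exact le_antisymm (pvIdxE_le cs 1) h
      rw [hidx, List.take_length]
    · rw [if_neg hj]
      obtain ⟨hge, hpre, hmin⟩ := PySem.Chars.findFrom_natCast_spec cs ['}'] pos hpos hj
      set j := PySem.Chars.findFrom cs ['}'] (pos : Int) none with hjdef
      have hjc : cs[j.toNat]? = some '}' := (pvSingleton_prefix_drop cs j.toNat).mp hpre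
      have hjlen : j.toNat < cs.length := by
        rcases List.getElem?_eq_some_iff.mp hjc with ⟨h, -⟩
        exact h
      have hposle : pos ≤ j.toNat := by omega
      have hnobetween : ∀ m, pos ≤ m → m < j.toNat → cs[m]? ≠ some '}' := by
        intro m hm1 hm2 hc
        exact hmin m hm1 hm2 ((pvSingleton_prefix_drop cs m).mpr hc)
      have hbelow : ∀ m, m < j.toNat → ¬ pvStop cs 1 m := by
        intro m hm hstop
        by_cases hmp : m < pos
        · exact hinv m hmp hstop
        · exact hnobetween m (by omega) hm hstop.1
      by_cases hcnt : (cs.take j.toNat).count '{' = (cs.take j.toNat).count '}'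
      · rw [if_pos hcnt]
        have hstopj : pvStop cs 1 j.toNat := ⟨hjc, by omega⟩
        have hidx : pvIdxE cs 1 = j.toNat := by
          rcases Nat.lt_trichotomy (pvIdxE cs 1) j.toNat with h | h | h
          · exact absurd ((pvIdxE_spec cs 1 le_rfl).2 (by omega)) (hbelow _ h)
          · exact h
          · exact absurd hstopj ((pvIdxE_spec cs 1 le_rfl).1 j.toNat h)
        rw [hidx]
      · rw [if_neg hcnt]
        refine ih (j.toNat + 1) (by omega) (by omega) ?_
        intro m hm hstop
        by_cases hmj : m < j.toNat
        · exact hbelow m hmj hstop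
        · have hmeq : m = j.toNat := by omega
          subst hmeq
          have := hstop.2
          omega

-- ===== VERDICT (by name: the statement is the Claim_ definition above) =====
theorem extract_box_str_spec : Claim_equal_extract_box_str := by
  intro resp _
  unfold Spec_extract_box_str extract_box_str extract_box_str_alt
  cases hbox : PySem.Str.isIn "boxed" (PySem.Str.replace resp "ки" "")
  · simp only [hbox, Bool.false_eq_true, if_false, if_true]
  · simp only [hbox, Bool.true_eq_false, if_true, if_false]
    by_cases hlen : PySem.Str.len ((PySem.List.pyGet? ((PySem.Str.split? (PySem.Str.replace resp "ки" "") "boxed").getD []) (-1)).getD "") = 0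
    · simp only [if_pos hlen]
    · simp only [if_neg hlen]
      by_cases hbrace : PySem.List.pyGet? ((PySem.List.pyGet? ((PySem.Str.split? (PySem.Str.replace resp "ки" "") "boxed").getD []) (-1)).getD "").toList 0 = some '{'
      · simp only [hbrace, ne_eq, not_true_eq_false, if_false]
        refine congrArg String.ofList ?_
        rw [pvALoop_eq_take _ 1,
          pvBLoop_eq_take _ _ 0 (by omega) (by omega) (fun m hm => absurd hm (by omega))]
      · simp only [ne_eq, hbrace, not_false_eq_true, if_true, if_false]
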